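-- pv_equiv track=rewrite | github.com/JCalvi18/fractals | cairo/renderer.py | s_triangle
-- ===== SOURCE A (Python) =====
-- def s_triangle(level):
--     triangle = [[1], [1] * 2]
--     if level < 2:
--         return triangle
--
--     prev = triangle[1]
--     for _ in range(2 ** level - 2):
--         line = [1]
--         for i, j in zip(prev[1:], prev[:-1]):
--             line.append(i ^ j)
--         line.append(1)
--         triangle.append(line)
--         prev = line
--     return triangle
-- ===== SOURCE B (Python) =====
-- def s_triangle(level):
--     n_rows = 2 if level < 2 else 2 ** level
--     return [[1 if k & (n - k) == 0 else 0 for k in range(n + 1)]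
--             for n in range(n_rows)]
-- ===== Notes on version B (the rewrite author's own statement) =====
-- stated objective: idiomatic
-- what changed: Replaces the row-by-row XOR recurrence (each row built from the previous one) with a direct closed form: entry (n,k) is 1 iff k & (n-k) == 0 (Lucas/Kummer: C(n,k) is odd iff k is a bit-submask of n), so every cell is computed independently from its indices.
import Mathlib
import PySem

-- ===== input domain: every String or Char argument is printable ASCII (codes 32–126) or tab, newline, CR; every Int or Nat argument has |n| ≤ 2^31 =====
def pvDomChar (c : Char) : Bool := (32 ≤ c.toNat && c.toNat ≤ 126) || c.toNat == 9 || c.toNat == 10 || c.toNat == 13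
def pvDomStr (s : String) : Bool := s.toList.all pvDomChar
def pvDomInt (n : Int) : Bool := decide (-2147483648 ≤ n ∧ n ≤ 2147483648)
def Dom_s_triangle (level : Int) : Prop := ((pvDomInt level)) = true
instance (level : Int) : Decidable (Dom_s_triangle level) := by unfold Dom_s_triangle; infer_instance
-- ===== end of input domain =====

-- B replaces A's row-by-row XOR recurrence with the closed form "entry (n,k) = 1 iff k &&& (n-k) = 0"
-- (C(n,k) is odd iff k is a bit-submask of n), computing every cell directly from its indices (objective: idiomatic).


-- ===== PORT A =====
-- Literal port of A: start from [[1],[1,1]]; if level < 2 return it; otherwise run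
-- range(2**level - 2) iterations, each building the next line by XORing prev[1:] with prev[:-1]
-- and appending it. (level ≥ 2 in that branch, so 2**level = 2 ^ level.toNat exactly.)
def s_triangle (level : Int) : List (List Int) :=
  let triangle : List (List Int) := [[1], [1, 1]]
  if level < 2 then triangle
  else
    let st := (List.range (2 ^ level.toNat - 2)).foldl
      (fun (st : List (List Int) × List Int) _ =>
        let prev := st.2
        let line := [1] ++ List.zipWith (fun i j => PySem.Int.bxor i j) (prev.drop 1) prev.dropLast ++ [1]
        (st.1 ++ [line], line))
      (triangle, [1, 1])
    st.1

-- ===== PORT B =====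
-- Literal port of Source B: n_rows = 2 if level < 2 else 2**level, then the double comprehension
-- with the submask test k & (n - k) == 0 (all indices are nonnegative, so Nat arithmetic is exact).
def s_triangle_alt (level : Int) : List (List Int) :=
  let nRows : Nat := if level < 2 then 2 else 2 ^ level.toNat
  (List.range nRows).map (fun n =>
    (List.range (n + 1)).map (fun k => if k &&& (n - k) = 0 then (1 : Int) else 0))

-- ===== PRECONDITION & SPEC =====
def Spec_s_triangle (level : Int) (out : List (List Int)) : Prop := out = s_triangle_alt level
instance (level : Int) (out : List (List Int)) : Decidable (Spec_s_triangle level out) := by unfold Spec_s_triangle; infer_instance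

-- ===== CLAIM (what is proved, stated in full; the proofs are below) =====
def Claim_equal_s_triangle : Prop := ∀ (level : Int), Dom_s_triangle level → Spec_s_triangle level (s_triangle level)

-- ===== LEMMAS AND PROOFS =====

def rowB (n : Nat) : List Int :=
  (List.range (n + 1)).map (fun k => if k &&& (n - k) = 0 then (1 : Int) else 0)
theorem land_zero_iff (a b : Nat) :
    a &&& b = 0 ↔ (a % 2 = 0 ∨ b % 2 = 0) ∧ (a / 2) &&& (b / 2) = 0 := by
  constructor
  · intro h
    refine ⟨?_, ?_⟩
    · by_contra hc
      push Not at hc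
      have h0 : (a &&& b).testBit 0 = true := by
        rw [Nat.testBit_land]
        simp only [Nat.testBit_zero]
        simpa using And.intro hc.1 hc.2
      rw [h] at h0
      simp at h0
    · apply Nat.eq_of_testBit_eq
      intro i
      rw [Nat.testBit_land, Nat.testBit_div_two, Nat.testBit_div_two, ← Nat.testBit_land, h]
      simp [Nat.zero_testBit]
  · rintro ⟨h1, h2⟩
    apply Nat.eq_of_testBit_eq
    intro i
    rw [Nat.testBit_land]
    cases i with
    | zero => simp [Nat.testBit_zero]; omega
    | succ i =>
      have := congrArg (fun x => x.testBit i) h2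
      simp only [Nat.testBit_land, Nat.testBit_div_two, Nat.zero_testBit] at this ⊢
      exact this
theorem choose_odd_iff (n : Nat) : ∀ k m : Nat, k + m = n →
    ((k + m).choose k % 2 = 1 ↔ k &&& m = 0) := by
  induction n using Nat.strong_induction_on with
  | _ n ih =>
    intro k m hn
    have lucas := @Choose.choose_modEq_choose_mod_mul_choose_div_nat (k + m) k 2 ⟨Nat.prime_two⟩
    unfold Nat.ModEq at lucas
    rcases Nat.eq_zero_or_pos n with h0 | hpos
    · subst hn
      have hk : k = 0 := by omega
      have hm : m = 0 := by omega
      subst hk; subst hm; decide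
    · have hdiv : k / 2 + m / 2 < n := by omega
      have ihh := ih (k / 2 + m / 2) hdiv (k / 2) (m / 2) rfl
      rcases Nat.mod_two_eq_zero_or_one k with hk | hk <;>
        rcases Nat.mod_two_eq_zero_or_one m with hm | hm
      · have e1 : (k + m) % 2 = 0 := by omega
        have e2 : (k + m) / 2 = k / 2 + m / 2 := by omega
        rw [e1, e2, hk] at lucas
        rw [lucas, land_zero_iff]
        simp [hk, ihh]
      · have e1 : (k + m) % 2 = 1 := by omega
        have e2 : (k + m) / 2 = k / 2 + m / 2 := by omega
        rw [e1, e2, hk] at lucas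
        rw [lucas, land_zero_iff]
        simp [hk, hm, ihh]
      · have e1 : (k + m) % 2 = 1 := by omega
        have e2 : (k + m) / 2 = k / 2 + m / 2 := by omega
        rw [e1, e2, hk] at lucas
        rw [lucas, land_zero_iff]
        simp [hk, hm, ihh]
      · have e1 : (k + m) % 2 = 0 := by omega
        have e2 : (k + m) / 2 = k / 2 + m / 2 + 1 := by omega
        rw [e1, e2, hk] at lucas
        rw [lucas, land_zero_iff]
        simp [hk, hm]
theorem entry_eq_choose (n k : Nat) (h : k ≤ n) :
    (if k &&& (n - k) = 0 then (1 : Int) else 0) = ((n.choose k % 2 : Nat) : Int) := by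
  have hiff := choose_odd_iff n k (n - k) (by omega)
  rw [Nat.add_sub_cancel' h] at hiff
  by_cases hc : k &&& (n - k) = 0
  · rw [if_pos hc, hiff.mpr hc]
    rfl
  · rw [if_neg hc]
    have h2 : n.choose k % 2 = 0 ∨ n.choose k % 2 = 1 := Nat.mod_two_eq_zero_or_one _
    have : n.choose k % 2 = 0 := by
      rcases h2 with h2 | h2
      · exact h2
      · exact absurd (hiff.mp h2) hc
    rw [this]
    rfl
theorem bxor_parity (a b : Nat) :
    (((a + b) % 2 : Nat) : Int) = PySem.Int.bxor ((a % 2 : Nat) : Int) ((b % 2 : Nat) : Int) := by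
  rcases Nat.mod_two_eq_zero_or_one a with ha | ha <;>
    rcases Nat.mod_two_eq_zero_or_one b with hb | hb <;>
    · have : (a + b) % 2 = (a % 2 + b % 2) % 2 := by omega
      rw [this, ha, hb]; decide
theorem zipWith_self {α β : Type} (F : α → α → β) (l : List α) :
    List.zipWith F l l = l.map (fun a => F a a) := by
  induction l with
  | nil => rfl
  | cons a l ih => simp
theorem rowB_succ (n : Nat) :
    rowB (n + 1) = [1] ++ List.zipWith (fun i j => PySem.Int.bxor i j) ((rowB n).drop 1) (rowB n).dropLast ++ [1] := by
  have hdrop : (rowB n).drop 1 =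
      (List.range n).map (fun k => if (k + 1) &&& (n - (k + 1)) = 0 then (1 : Int) else 0) := by
    rw [rowB, List.range_succ_eq_map]
    simp [List.map_map, Function.comp_def]
  have hlast : (rowB n).dropLast =
      (List.range n).map (fun k => if k &&& (n - k) = 0 then (1 : Int) else 0) := by
    rw [rowB, List.range_succ]
    simp
  rw [hdrop, hlast, List.zipWith_map, zipWith_self, rowB, List.range_succ_eq_map,
      List.map_cons, List.map_map, List.range_succ, List.map_append]
  simp only [List.cons_append, List.nil_append, Function.comp_def, List.map_cons, List.map_nil]
  congr 1
  · simp
  congr 1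
  · apply List.map_congr_left
    intro k hk
    have hk' : k < n := List.mem_range.mp hk
    rw [entry_eq_choose (n+1) (k+1) (by omega), entry_eq_choose n (k+1) (by omega),
        entry_eq_choose n k (by omega), Nat.choose_succ_succ, Nat.add_comm (n.choose k),
        bxor_parity]
  · simp

-- one iteration of A's loop
def stepA (st : List (List Int) × List Int) : List (List Int) × List Int :=
  let prev := st.2
  let line := [1] ++ List.zipWith (fun i j => PySem.Int.bxor i j) (prev.drop 1) prev.dropLast ++ [1]
  (st.1 ++ [line], line)

-- loop invariant: after t iterations A holds exactly the first t+2 closed-form rows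
theorem foldl_stepA (t : Nat) :
    (List.range t).foldl (fun st _ => stepA st) ([[1], [1, 1]], [1, 1]) =
      ((List.range (t + 2)).map rowB, rowB (t + 1)) := by
  induction t with
  | zero => decide
  | succ t ih =>
    rw [List.range_succ, List.foldl_append, ih]
    simp only [List.foldl_cons, List.foldl_nil, stepA]
    rw [← rowB_succ (t + 1)]
    have hr : List.range (t + 1 + 2) = List.range (t + 2) ++ [t + 2] := List.range_succ
    rw [hr, List.map_append]
    rfl

-- ===== VERDICT (by name: the statement is the Claim_ definition above) =====
theorem s_triangle_spec : Claim_equal_s_triangle := by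
  intro level _
  unfold Spec_s_triangle s_triangle s_triangle_alt
  by_cases h : level < 2
  · simp only [h, if_pos]
    decide
  · simp only [h, if_neg, not_false_iff]
    have key := foldl_stepA (2 ^ level.toNat - 2)
    have h4 : 4 ≤ 2 ^ level.toNat := by
      have h2 : 2 ≤ level.toNat := by omega
      calc 4 = 2 ^ 2 := rfl
        _ ≤ 2 ^ level.toNat := Nat.pow_le_pow_right (by norm_num) h2
    have ht : 2 ^ level.toNat - 2 + 2 = 2 ^ level.toNat := by omega
    change ((List.range (2 ^ level.toNat - 2)).foldl (fun st _ => stepA st) ([[1], [1, 1]], [1, 1])).1 = _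
    rw [key, ht]
    rfl
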